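-- pv_equiv track=rewrite | github.com/sharique-ansari/Hackerrank-IPK | alternatingcharacters.py | alternatingCharacters
-- ===== SOURCE A (Python) =====
-- def alternatingCharacters(s):
--     prev = ''
--     out = 0
--     for j in s:
--         if j == prev:
--             i = s.index(j)
--             s = s[:i] + s[i + 1:]
--             out += 1
--         prev = j
--     return out
-- ===== SOURCE B (Python) =====
-- def alternatingCharacters(s):
--     return sum(1 for a, b in zip(s, s[1:]) if a == b)
-- ===== Notes on version B (the rewrite author's own statement) =====
-- stated objective: faster
-- what changed: replaces the loop that repeatedly calls s.index and rebuilds the string by slicing with a single zip pass counting positions where a character equals its predecessor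
import Mathlib
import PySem

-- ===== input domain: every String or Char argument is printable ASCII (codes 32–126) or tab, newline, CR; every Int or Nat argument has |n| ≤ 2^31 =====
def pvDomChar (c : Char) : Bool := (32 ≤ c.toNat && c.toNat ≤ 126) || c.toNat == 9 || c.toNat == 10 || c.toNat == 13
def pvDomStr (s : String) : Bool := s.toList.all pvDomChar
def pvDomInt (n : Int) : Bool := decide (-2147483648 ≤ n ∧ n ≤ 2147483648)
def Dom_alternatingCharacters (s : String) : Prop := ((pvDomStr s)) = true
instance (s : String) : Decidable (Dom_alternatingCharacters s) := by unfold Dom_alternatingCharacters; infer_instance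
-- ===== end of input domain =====

-- B replaces A's quadratic index-and-reslice loop with one linear zip pass; objective: faster.

-- ===== PORT A =====
-- state: (current string s as char list, prev as char list ('' or one char), out)
def pvStepA (st : List Char × List Char × Int) (j : Char) : List Char × List Char × Int :=
  let cur := st.1
  let prev := st.2.1
  let out := st.2.2
  if [j] = prev then
    match PySem.List.index? cur j with
    | some i =>
        (PySem.List.slice cur none (some (i : Int)) ++
           PySem.List.slice cur (some ((i : Int) + 1)) none, [j], out + 1)
    | none => (cur, [j], out)   -- ValueError in Python; unreachable (j == prev is in cur)
  else (cur, [j], out)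

def alternatingCharacters (s : String) : Int :=
  (s.toList.foldl pvStepA (s.toList, [], 0)).2.2

-- ===== PORT B =====
def alternatingCharacters_alt (s : String) : Int :=
  (((s.toList.zip s.toList.tail).filter (fun p => p.1 == p.2)).length : Int)

-- ===== PRECONDITION & SPEC =====
def Spec_alternatingCharacters (s : String) (out : Int) : Prop := out = alternatingCharacters_alt s
instance (s : String) (out : Int) : Decidable (Spec_alternatingCharacters s out) := by unfold Spec_alternatingCharacters; infer_instance

-- ===== CLAIM (what is proved, stated in full; the proofs are below) =====
def Claim_equal_alternatingCharacters : Prop := ∀ (s : String), Dom_alternatingCharacters s → Spec_alternatingCharacters s (alternatingCharacters s)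

-- ===== LEMMAS AND PROOFS =====

-- the running count A's loop produces, seeded with prev
def pvCnt : List Char → List Char → Int
  | _, [] => 0
  | prev, j :: t => (if [j] = prev then 1 else 0) + pvCnt [j] t

-- removing the character at the first index of j (A's slice expression) is List.erase
lemma pvRemove_eq (cur : List Char) (j : Char) (i : Nat)
    (h : PySem.List.index? cur j = some i) :
    PySem.List.slice cur none (some (i : Int)) ++
      PySem.List.slice cur (some ((i : Int) + 1)) none = cur.erase j := by
  rcases (PySem.List.index?_eq_some_iff cur j i).mp h with ⟨pre, suf, rfl, rfl, hnm⟩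
  have h1 : PySem.List.slice (pre ++ j :: suf) none (some ((pre.length : Nat) : Int)) =
      (pre ++ j :: suf).take pre.length := PySem.List.slice_to_natCast _ _
  have h2 : ((pre.length : Nat) : Int) + 1 = ((pre.length + 1 : Nat) : Int) := by push_cast; ring
  rw [h1, h2, PySem.List.slice_from_natCast]
  rw [List.erase_append_right _ hnm]
  simp [List.drop_append]

-- loop invariant: cur is a permutation of u ++ remaining, and prev's char lives in u
lemma pvLoopA (t : List Char) : ∀ (cur u prev : List Char) (out : Int),
    cur.Perm (u ++ t) → (∀ c, prev = [c] → c ∈ u) →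
    (t.foldl pvStepA (cur, prev, out)).2.2 = out + pvCnt prev t := by
  induction t with
  | nil => intro cur u prev out _ _; simp [pvCnt]
  | cons j t ih =>
    intro cur u prev out hperm hprev
    by_cases hj : [j] = prev
    · -- j equals prev: j ∈ u, so j ∈ cur and index? succeeds
      have hju : j ∈ u := hprev j hj.symm
      have hjcur : j ∈ cur := hperm.mem_iff.mpr (List.mem_append.mpr (Or.inl hju))
      obtain ⟨i, hi⟩ := Option.isSome_iff_exists.mp
        ((PySem.List.index?_isSome_iff cur j).mpr hjcur)
      have hstep : pvStepA (cur, prev, out) j = (cur.erase j, [j], out + 1) := by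
        simp only [pvStepA, if_pos hj, hi]
        rw [pvRemove_eq cur j i hi]
      have hperm' : (cur.erase j).Perm (u ++ t) := by
        have h1 : cur.Perm (j :: (u ++ t)) := hperm.trans List.perm_middle
        have h2 := h1.erase j
        simpa using h2
      have := ih (cur.erase j) u [j] (out + 1) hperm' (by intro c hc; cases hc; exact hju)
      simp only [List.foldl_cons, hstep, this, pvCnt, if_pos hj]
      ring
    · -- j differs from prev: nothing removed
      have hstep : pvStepA (cur, prev, out) j = (cur, [j], out) := by
        simp [pvStepA, hj]
      have hperm' : cur.Perm ((u ++ [j]) ++ t) := by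
        simpa [List.append_assoc] using hperm
      have := ih cur (u ++ [j]) [j] out hperm'
        (by intro c hc; cases hc; exact List.mem_append.mpr (Or.inr (List.mem_singleton.mpr rfl)))
      simp only [List.foldl_cons, hstep, this, pvCnt, if_neg hj]
      ring
  
-- the seeded count equals the zip count of adjacent equal pairs
lemma pvCnt_zip (l : List Char) : ∀ c : Char,
    pvCnt [c] l = ((((c :: l).zip l).filter (fun p => p.1 == p.2)).length : Int) := by
  induction l with
  | nil => intro c; simp [pvCnt]
  | cons j t ih =>
    intro c
    simp only [pvCnt, List.zip_cons_cons, List.filter_cons]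
    by_cases hcj : c = j
    · simp [hcj, ih j]; ring
    · have : ¬ ([j] = [c]) := by simpa [List.cons.injEq] using fun h => hcj h.symm
      simp [this, hcj, ih j]

lemma pvCnt_nil_eq (l : List Char) :
    pvCnt [] l = (((l.zip l.tail).filter (fun p => p.1 == p.2)).length : Int) := by
  cases l with
  | nil => simp [pvCnt]
  | cons c t => simpa [pvCnt] using pvCnt_zip t c

-- ===== VERDICT (by name: the statement is the Claim_ definition above) =====
theorem alternatingCharacters_spec : Claim_equal_alternatingCharacters := by
  intro s _
  unfold Spec_alternatingCharacters alternatingCharacters alternatingCharacters_alt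
  rw [pvLoopA s.toList s.toList [] [] 0 (by simp) (by intro c h; cases h)]
  rw [pvCnt_nil_eq]
  ring
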